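-- pv_equiv track=rewrite | github.com/slucchini/advent-of-code-2023 | Day1.py | getNumsFromLines
-- ===== SOURCE A (Python) =====
-- def getNumsFromLines(lines):
--     nums = []
--     for line in lines:
--         linenums = []
--         for char in line:
--             try:
--                 linenums.append(int(char))
--             except:
--                 None
--         nums.append(linenums[0]*10+linenums[-1])
--     return nums
-- ===== SOURCE B (Python) =====
-- def getNumsFromLines(lines):
--     return [
--         next(int(c) for c in line if c.isdigit()) * 10
--         + next(int(c) for c in reversed(line) if c.isdigit())
--         for line in lines
--     ]
-- ===== Notes on version B (the rewrite author's own statement) =====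
-- stated objective: alternative
-- what changed: Instead of building the full list of all digits per line and indexing it at 0 and -1, B takes the first digit of a forward scan and the first digit of a backward scan with next(); Pre_ excludes lines without any digit, on which A raises IndexError.
import Mathlib
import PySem

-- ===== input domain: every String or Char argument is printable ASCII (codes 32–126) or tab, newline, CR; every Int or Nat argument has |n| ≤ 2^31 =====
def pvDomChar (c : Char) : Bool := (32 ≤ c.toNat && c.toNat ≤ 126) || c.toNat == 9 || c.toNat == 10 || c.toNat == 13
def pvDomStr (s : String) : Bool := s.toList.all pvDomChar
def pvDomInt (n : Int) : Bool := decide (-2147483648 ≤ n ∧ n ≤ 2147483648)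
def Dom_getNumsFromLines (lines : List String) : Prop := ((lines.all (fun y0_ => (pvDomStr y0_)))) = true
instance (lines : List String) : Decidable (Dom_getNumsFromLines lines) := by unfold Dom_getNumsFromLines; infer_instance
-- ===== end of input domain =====

-- B replaces A's per-line digit-list construction indexed at 0 and -1 by taking the
-- first digit of a forward scan and of a backward scan (early exit); alternative
-- decomposition, same cost. Pre_ excludes lines without a digit (A raises there).


-- ===== PORT A =====
-- int(char) on a single ASCII char succeeds exactly for '0'..'9' (Char.isDigit);
-- the try/except appends the digit or does nothing.
def pvDigitsA (cs : List Char) : List Int :=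
  cs.foldl (fun acc c => if c.isDigit then acc ++ [((c.toNat : Int) - 48)] else acc) []

def getNumsFromLines (lines : List String) : List Int :=
  lines.foldl (fun nums line =>
    let linenums := pvDigitsA line.toList
    -- linenums[0] and linenums[-1]; Pre_ guarantees both indexings succeed
    nums ++ [(PySem.List.pyGet? linenums 0).getD 0 * 10 + (PySem.List.pyGet? linenums (-1)).getD 0]) []

-- ===== PORT B =====
-- next(int(c) for c in cs if c.isdigit()): first digit of a char scan, early exit
def pvFirstDigit? (cs : List Char) : Option Int :=
  match cs with
  | [] => none
  | c :: rest => if c.isDigit then some ((c.toNat : Int) - 48) else pvFirstDigit? rest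

def getNumsFromLines_alt (lines : List String) : List Int :=
  lines.map (fun line =>
    match pvFirstDigit? line.toList, pvFirstDigit? line.toList.reverse with
    | some first, some last => first * 10 + last
    | _, _ => 0)   -- unreachable under Pre_ (Source B's next raises StopIteration there)

-- ===== PRECONDITION & SPEC =====
-- A raises IndexError (linenums[0] on an empty list) on any line without a digit and
-- B raises StopIteration there; Pre_ admits exactly the inputs where every line has a digit.
def Pre_getNumsFromLines (lines : List String) : Prop :=
  ∀ s ∈ lines, s.toList.any Char.isDigit = true
instance (lines : List String) : Decidable (Pre_getNumsFromLines lines) := by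
  unfold Pre_getNumsFromLines; infer_instance

def pvWitness_getNumsFromLines : List String := ["1abc2", "treb7uchet"]

def Spec_getNumsFromLines (lines : List String) (out : List Int) : Prop := out = getNumsFromLines_alt lines
instance (lines : List String) (out : List Int) : Decidable (Spec_getNumsFromLines lines out) := by unfold Spec_getNumsFromLines; infer_instance

-- ===== CLAIM (what is proved, stated in full; the proofs are below) =====
def Claim_equal_getNumsFromLines : Prop := ∀ (lines : List String), Dom_getNumsFromLines lines → Pre_getNumsFromLines lines → Spec_getNumsFromLines lines (getNumsFromLines lines)

-- ===== LEMMAS AND PROOFS =====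

-- A's filtered accumulation is filter-then-map
theorem pvDigitsA_eq (cs : List Char) :
    pvDigitsA cs = (cs.filter Char.isDigit).map (fun c => ((c.toNat : Int) - 48)) := by
  unfold pvDigitsA
  rw [PySem.List.foldl_append_if]
  simp

-- B's forward scan is the head of filter-then-map
theorem pvFirstDigit?_eq (cs : List Char) :
    pvFirstDigit? cs = ((cs.filter Char.isDigit).map (fun c => ((c.toNat : Int) - 48))).head? := by
  induction cs with
  | nil => rfl
  | cons c rest ih =>
    by_cases h : c.isDigit <;> simp [pvFirstDigit?, h, ih]

theorem pvFirstDigit?_reverse (cs : List Char) :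
    pvFirstDigit? cs.reverse
      = ((cs.filter Char.isDigit).map (fun c => ((c.toNat : Int) - 48))).getLast? := by
  rw [pvFirstDigit?_eq, List.getLast?_eq_head?_reverse, ← List.map_reverse, ← List.filter_reverse]

-- ===== VERDICT (by name: the statement is the Claim_ definition above) =====
theorem getNumsFromLines_spec : Claim_equal_getNumsFromLines := by
  intro lines _ hpre
  unfold Spec_getNumsFromLines getNumsFromLines getNumsFromLines_alt
  rw [PySem.List.foldl_append_singleton_eq_map]
  apply List.map_congr_left
  intro s hs
  have hdig := hpre s hs
  obtain ⟨d, hdmem, hd⟩ := List.any_eq_true.mp hdig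
  have hne : (s.toList.filter Char.isDigit).map (fun c => ((c.toNat : Int) - 48)) ≠ [] := by
    simp only [ne_eq, List.map_eq_nil_iff]
    exact List.ne_nil_of_mem (List.mem_filter.mpr ⟨hdmem, hd⟩)
  rw [pvDigitsA_eq, pvFirstDigit?_eq, pvFirstDigit?_reverse]
  set L := (s.toList.filter Char.isDigit).map (fun c => ((c.toNat : Int) - 48)) with hL
  cases h1 : L.head? with
  | none => exact absurd (List.head?_eq_none_iff.mp h1) hne
  | some a =>
    cases h2 : L.getLast? with
    | none => exact absurd (List.getLast?_eq_none_iff.mp h2) hne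
    | some b =>
      rw [PySem.List.pyGet?_neg_one, h2]
      rw [show (0 : Int) = ((0 : Nat) : Int) from rfl, PySem.List.pyGet?_natCast]
      rw [← List.head?_eq_getElem?, h1]
      simp
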